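-- pv_equiv track=rewrite | github.com/shanjay-athithya/Data-Structures | EX 4/1. time complex.py | horner
-- ===== SOURCE A (Python) =====
-- def horner(exp, sol):
--     """
--     This function takes two parameters:
--     exp: a list of integers, representing the coefficients of a polynomial
--     sol: an integer, representing the value of x for which the polynomial needs to be evaluated
--     This function computes the value of the polynomial using the Horner's method,
--     and returns the number of operations performed.
--     """
--     c = 0
--     n = len(exp)
--     c += 1
--     #assignning the coefficient of higher power
--     result = exp[0]
--     #iterating the coefficients
--     for i in range(1, n):
--         c += 1
--         result = result * sol + exp[i]
--         c += 1
--     c += 1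
--     #returning the number of operations performed
--     return c
-- ===== SOURCE B (Python) =====
-- def horner(exp, sol):
--     # Closed form: A counts 2 operations up front and 2 per loop iteration
--     # over range(1, len(exp)), i.e. 2 + 2*(len(exp)-1) = 2*len(exp).
--     return 2 * len(exp)
-- ===== Notes on version B (the rewrite author's own statement) =====
-- stated objective: faster
-- what changed: Replaced the operation-counting loop by the closed form 2*len(exp).
import Mathlib
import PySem

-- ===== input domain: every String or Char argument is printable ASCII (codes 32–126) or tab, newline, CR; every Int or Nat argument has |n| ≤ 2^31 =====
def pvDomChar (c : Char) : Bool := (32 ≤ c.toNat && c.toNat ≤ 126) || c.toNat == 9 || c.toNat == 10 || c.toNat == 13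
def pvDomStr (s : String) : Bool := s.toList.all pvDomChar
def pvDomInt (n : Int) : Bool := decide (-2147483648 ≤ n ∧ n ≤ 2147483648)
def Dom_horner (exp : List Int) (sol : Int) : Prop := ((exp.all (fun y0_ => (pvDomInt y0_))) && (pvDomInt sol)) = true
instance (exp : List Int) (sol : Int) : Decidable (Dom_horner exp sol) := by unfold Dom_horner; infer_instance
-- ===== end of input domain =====

-- ===== PORT A =====
-- Literal port of A's counting loop; exp[0]/exp[i] are read with pyGetD 0,
-- exact on Pre_ (nonempty exp makes every index in range).
def horner (exp : List Int) (sol : Int) : Int :=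
  let c : Int := 0
  let n : Int := (exp.length : Int)
  let c := c + 1
  let result := PySem.List.pyGetD exp 0 0
  let st := (PySem.List.pyRange 1 n 1).foldl
    (fun (st : Int × Int) i =>
      let c := st.1 + 1
      let result := st.2 * sol + PySem.List.pyGetD exp i 0
      (c + 1, result)) (c, result)
  st.1 + 1

-- ===== PORT B =====
-- Closed form: 2 operations up front plus 2 per iteration = 2*len(exp).
def horner_alt (exp : List Int) (sol : Int) : Int := 2 * (exp.length : Int)

-- ===== PRECONDITION & SPEC =====
-- Pre_ excludes the empty list, on which A raises IndexError at exp[0].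
def Pre_horner (exp : List Int) (sol : Int) : Prop := exp ≠ []
instance (exp : List Int) (sol : Int) : Decidable (Pre_horner exp sol) := by unfold Pre_horner; infer_instance
def pvWitness_horner : List Int × Int := ([2, 3], 5)

def Spec_horner (exp : List Int) (sol : Int) (out : Int) : Prop := out = horner_alt exp sol
instance (exp : List Int) (sol : Int) (out : Int) : Decidable (Spec_horner exp sol out) := by unfold Spec_horner; infer_instance

-- ===== CLAIM (what is proved, stated in full; the proofs are below) =====
def Claim_equal_horner : Prop := ∀ (exp : List Int) (sol : Int), Dom_horner exp sol → Pre_horner exp sol → Spec_horner exp sol (horner exp sol)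

-- ===== LEMMAS AND PROOFS =====
-- The counter component of A's loop only counts: it gains 2 per element.
theorem horner_fold_fst (exp : List Int) (sol : Int) (l : List Int) (c r : Int) :
    (l.foldl (fun (st : Int × Int) i =>
      (st.1 + 1 + 1, st.2 * sol + PySem.List.pyGetD exp i 0)) (c, r)).1
      = c + 2 * (l.length : Int) := by
  induction l generalizing c r with
  | nil => simp
  | cons x xs ih =>
    simp only [List.foldl_cons, ih, List.length_cons]
    push_cast
    ring

-- ===== VERDICT (by name: the statement is the Claim_ definition above) =====
theorem horner_spec : Claim_equal_horner := by
  intro exp sol _ hpre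
  unfold Spec_horner horner horner_alt
  simp only []
  rw [horner_fold_fst, PySem.List.length_pyRange_one]
  have hlen : 1 ≤ exp.length := List.length_pos_of_ne_nil hpre
  have : ((exp.length : Int) - 1).toNat = exp.length - 1 := by omega
  rw [this]
  push_cast [Nat.cast_sub hlen]
  ring
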